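-- pv_equiv track=rewrite | github.com/cmoulicms/leetcode | data_structure_and_algorithm/leetcode/problems/easy/599_minimum_index_sum_two_lists.py | findResaurant
-- ===== SOURCE A (Python) =====
-- from typing import List
--
-- def findResaurant(list1: List[str], list2: List[str]):
--     list3 = []
--     min_index_sum = 0
--     index_sum = 0
--     for i in range(0, len(list1)):
--         for j in range(0, len(list2)):
--             if list1[i] == list2[j]:
--                 min_index_sum = i + j
--                 list3.append(list1[i])
--     return list3
-- ===== SOURCE B (Python) =====
-- from typing import List
--
-- def findResaurant(list1: List[str], list2: List[str]):
--     cnt = {}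
--     for y in list2:
--         cnt[y] = cnt.get(y, 0) + 1
--     res = []
--     for x in list1:
--         res += [x] * cnt.get(x, 0)
--     return res
-- ===== Notes on version B (the rewrite author's own statement) =====
-- stated objective: faster
-- what changed: Replaces the nested O(n*m) scan of list2 for every list1 element with a counting dict built once over list2, then emits each list1 element count-many times in one pass.
import Mathlib
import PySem

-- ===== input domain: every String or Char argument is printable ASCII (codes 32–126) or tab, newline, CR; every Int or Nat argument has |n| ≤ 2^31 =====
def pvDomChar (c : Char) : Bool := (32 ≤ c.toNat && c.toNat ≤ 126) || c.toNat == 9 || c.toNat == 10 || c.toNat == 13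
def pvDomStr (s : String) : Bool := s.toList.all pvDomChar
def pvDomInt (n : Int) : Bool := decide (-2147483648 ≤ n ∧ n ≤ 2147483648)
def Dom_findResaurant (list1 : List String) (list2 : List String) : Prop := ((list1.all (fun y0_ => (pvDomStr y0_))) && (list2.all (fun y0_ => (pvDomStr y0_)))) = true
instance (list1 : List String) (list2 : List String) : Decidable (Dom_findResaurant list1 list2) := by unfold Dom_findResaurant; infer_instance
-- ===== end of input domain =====

-- B replaces A's nested scan of list2 for every list1 element by a counter dict over list2 and
-- a single pass over list1 (objective: faster, asymptotic O(n+m) vs O(n*m)).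

-- ===== PORT A =====
-- state = (list3, min_index_sum); min_index_sum is carried exactly as in A, though A never reads it
def findResaurant (list1 : List String) (list2 : List String) : List String :=
  let st :=
    (PySem.List.pyRange 0 (PySem.List.len list1) 1).foldl
      (fun (st : List String × Int) i =>
        (PySem.List.pyRange 0 (PySem.List.len list2) 1).foldl
          (fun (st : List String × Int) j =>
            if PySem.List.pyGetD list1 i "" == PySem.List.pyGetD list2 j "" then
              (st.1 ++ [PySem.List.pyGetD list1 i ""], i + j)
            else st)
          st)
      (([] : List String), (0 : Int))
  st.1

-- ===== PORT B =====
def findResaurant_alt (list1 : List String) (list2 : List String) : List String :=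
  let cnt : PySem.Dict String Int :=
    list2.foldl (fun d y => d.insert y (d.getD y 0 + 1)) PySem.Dict.empty
  list1.foldl (fun res x => res ++ List.replicate (cnt.getD x 0).toNat x) []

-- ===== PRECONDITION & SPEC =====
def Spec_findResaurant (list1 : List String) (list2 : List String) (out : List String) : Prop := out = findResaurant_alt list1 list2
instance (list1 : List String) (list2 : List String) (out : List String) : Decidable (Spec_findResaurant list1 list2 out) := by unfold Spec_findResaurant; infer_instance

-- ===== CLAIM (what is proved, stated in full; the proofs are below) =====
def Claim_equal_findResaurant : Prop := ∀ (list1 : List String) (list2 : List String), Dom_findResaurant list1 list2 → Spec_findResaurant list1 list2 (findResaurant list1 list2)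

-- ===== LEMMAS AND PROOFS =====

-- the first component of a fold over a pair state, when it depends only on the first component
theorem pv_fst_foldl {α β γ : Type} (f : α × β → γ → α × β) (g : α → γ → α)
    (h : ∀ st c, (f st c).1 = g st.1 c) :
    ∀ (l : List γ) (st : α × β), (l.foldl f st).1 = l.foldl g st.1 := by
  intro l
  induction l with
  | nil => intro st; rfl
  | cons c t ih => intro st; simp only [List.foldl_cons, ih, h]

-- appending x once per match against l accumulates count-many copies of x
theorem pv_foldl_append_replicate (x : String) :
    ∀ (l : List String) (a : List String),
      l.foldl (fun a y => if x == y then a ++ [x] else a) a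
        = a ++ List.replicate (l.count x) x := by
  intro l
  induction l with
  | nil => intro a; simp
  | cons y t ih =>
    intro a
    by_cases hxy : x = y
    · subst hxy
      rw [List.foldl_cons, if_pos (by simp), ih]
      simp only [List.count_cons, beq_self_eq_true, if_true, List.append_assoc]
      rw [List.singleton_append, ← List.replicate_succ]
    · rw [List.foldl_cons, if_neg (by simp [hxy]), ih]
      simp [Ne.symm hxy]

-- A's inner loop over list2, first component
theorem pv_inner (list2 : List String) (i : Int) (x : String) (st : List String × Int) :
    ((PySem.List.pyRange 0 (PySem.List.len list2) 1).foldl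
      (fun (st : List String × Int) j =>
        if x == PySem.List.pyGetD list2 j "" then (st.1 ++ [x], i + j) else st) st).1
      = st.1 ++ List.replicate (list2.count x) x := by
  have h1 := pv_fst_foldl
    (fun (st : List String × Int) j =>
      if x == PySem.List.pyGetD list2 j "" then (st.1 ++ [x], i + j) else st)
    (fun a j => if x == PySem.List.pyGetD list2 j "" then a ++ [x] else a)
    (by intro st c; by_cases h : (x == PySem.List.pyGetD list2 c "") = true <;> simp [h])
    (PySem.List.pyRange 0 (PySem.List.len list2) 1) st
  rw [h1,
    PySem.List.foldl_pyRange_zero_pyGetD list2 ""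
      (fun a y => if x == y then a ++ [x] else a) st.1,
    pv_foldl_append_replicate]

-- ===== VERDICT (by name: the statement is the Claim_ definition above) =====
theorem findResaurant_spec : Claim_equal_findResaurant := by
  intro list1 list2 _
  unfold Spec_findResaurant findResaurant findResaurant_alt
  rw [PySem.Dict.foldl_insert_getD_add_one_eq_counter]
  have houter := pv_fst_foldl
    (fun (st : List String × Int) i =>
      (PySem.List.pyRange 0 (PySem.List.len list2) 1).foldl
        (fun (st : List String × Int) j =>
          if PySem.List.pyGetD list1 i "" == PySem.List.pyGetD list2 j "" then
            (st.1 ++ [PySem.List.pyGetD list1 i ""], i + j)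
          else st) st)
    (fun a i => a ++ List.replicate (list2.count (PySem.List.pyGetD list1 i "")) (PySem.List.pyGetD list1 i ""))
    (by intro st i; exact pv_inner list2 i (PySem.List.pyGetD list1 i "") st)
    (PySem.List.pyRange 0 (PySem.List.len list1) 1) (([] : List String), (0 : Int))
  simp only [houter]
  rw [PySem.List.foldl_pyRange_zero_pyGetD list1 ""
      (fun a x => a ++ List.replicate (list2.count x) x) []]
  simp [PySem.Dict.getD_counter]
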